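-- pv_equiv track=rewrite | github.com/markmcb42/adventofcode | 2015/day22_2.py | valid_action
-- ===== SOURCE A (Python) =====
-- def valid_action(action):
--
--     action_str = ''.join(action)
--     pos = action_str.find('S')
--     prev = 0
--     while pos != -1:
--         prev = pos
--         pos = action_str.find('S', pos+1)
--         if pos != -1 and abs(pos - prev) < 5:
--             return False
--
--     pos = action_str.find('R')
--     prev = 0
--     while pos != -1:
--         prev = pos
--         pos = action_str.find('R', pos+1)
--         if pos != -1 and abs(pos - prev) < 4:
--             return False
--
--     pos = action_str.find('P')
--     prev = 0
--     while pos != -1: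
--         prev = pos
--         pos = action_str.find('P', pos+1)
--         if pos != -1 and abs(pos - prev) < 5:
--             return False
--
--     return True
-- ===== SOURCE B (Python) =====
-- def valid_action(action):
--     thresh = {'S': 5, 'R': 4, 'P': 5}
--     last = {}
--     for i, c in enumerate(''.join(action)):
--         if c in thresh:
--             if c in last and i - last[c] < thresh[c]:
--                 return False
--             last[c] = i
--     return True
-- ===== Notes on version B (the rewrite author's own statement) =====
-- stated objective: simpler
-- what changed: A's three separate while-loops that repeatedly re-scan the joined string with str.find (one whole pass per tracked character) are replaced by a single enumerate pass over the joined string that maintains a dict of each tracked character's last position and a dict of per-character thresholds.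
import Mathlib
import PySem

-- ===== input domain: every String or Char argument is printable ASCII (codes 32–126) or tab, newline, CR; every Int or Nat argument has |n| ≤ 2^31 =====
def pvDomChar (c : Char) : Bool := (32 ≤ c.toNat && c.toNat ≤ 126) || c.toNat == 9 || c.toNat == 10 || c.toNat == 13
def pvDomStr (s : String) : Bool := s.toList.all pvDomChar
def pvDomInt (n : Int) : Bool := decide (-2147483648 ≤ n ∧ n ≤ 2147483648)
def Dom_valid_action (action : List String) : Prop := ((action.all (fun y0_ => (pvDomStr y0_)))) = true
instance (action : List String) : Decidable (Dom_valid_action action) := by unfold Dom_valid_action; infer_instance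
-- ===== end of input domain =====

-- B replaces A's three find-rescanning while-loops by one enumerate pass with a last-position dict (objective: simpler).

-- ===== PORT A =====
-- the Python while loop 'pos = find(...); while pos != -1: ...'; fuel = length of the string
-- bounds the number of iterations (each found position is strictly larger than the previous one)
def loopA (cs sub : List Char) (k : Int) : Int → Nat → Bool
  | pos, fuel =>
    if pos = -1 then true
    else match fuel with
      | 0 => true
      | fuel' + 1 =>
        let pos' := PySem.Chars.findFrom cs sub (pos + 1)
        if pos' ≠ -1 ∧ |pos' - pos| < k then false
        else loopA cs sub k pos' fuel'

def checkA (cs sub : List Char) (k : Int) : Bool :=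
  loopA cs sub k (PySem.Chars.find cs sub) cs.length

def valid_action (action : List String) : Bool :=
  let cs := (PySem.Str.join "" action).toList
  checkA cs ['S'] 5 && (checkA cs ['R'] 4 && checkA cs ['P'] 5)

-- ===== PORT B =====
def threshB : PySem.Dict Char Int := PySem.Dict.ofList [('S', 5), ('R', 4), ('P', 5)]

def goB : List (Int × Char) → PySem.Dict Char Int → Bool
  | [], _ => true
  | (i, c) :: rest, last =>
    match threshB.get? c with
    | none => goB rest last
    | some k =>
      match last.get? c with
      | some j => if i - j < k then false else goB rest (last.insert c i)
      | none => goB rest (last.insert c i)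

def valid_action_alt (action : List String) : Bool :=
  goB (PySem.List.enumerate ((PySem.Str.join "" action).toList)) PySem.Dict.empty

-- ===== PRECONDITION & SPEC =====
def Spec_valid_action (action : List String) (out : Bool) : Prop := out = valid_action_alt action
instance (action : List String) (out : Bool) : Decidable (Spec_valid_action action out) := by unfold Spec_valid_action; infer_instance

-- ===== CLAIM (what is proved, stated in full; the proofs are below) =====
def Claim_equal_valid_action : Prop := ∀ (action : List String), Dom_valid_action action → Spec_valid_action action (valid_action action)

-- ===== LEMMAS AND PROOFS =====

-- indices (≥ start offset i) at which character c occurs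
def occs : List Char → Char → Int → List Int
  | [], _, _ => []
  | x :: xs, c, i => if x = c then i :: occs xs c (i + 1) else occs xs c (i + 1)

-- adjacent gaps all ≥ k
def gapsOK (k : Int) : List Int → Bool
  | a :: b :: t => if b - a < k then false else gapsOK k (b :: t)
  | _ => true

-- B's pass restricted to one tracked character, with an optional last position
def scanC (c : Char) (k : Int) : Option Int → List (Int × Char) → Bool
  | _, [] => true
  | last, (i, c') :: rest =>
    if c' = c then
      match last with
      | some j => if i - j < k then false else scanC c k (some i) rest
      | none => scanC c k (some i) rest
    else scanC c k last rest

lemma occs_length (l : List Char) (c : Char) : ∀ i, (occs l c i).length ≤ l.length := by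
  induction l with
  | nil => intro i; simp [occs]
  | cons x xs ih =>
    intro i
    by_cases h : x = c <;> simp [occs, h] <;> have := ih (i + 1) <;> omega

lemma singleton_prefix_iff (c : Char) (m : List Char) : [c] <+: m ↔ m.head? = some c := by
  constructor
  · rintro ⟨t, rfl⟩; rfl
  · intro h
    cases m with
    | nil => simp at h
    | cons x xs => simp at h; subst h; exact ⟨xs, rfl⟩

lemma findc (l : List Char) (c : Char) :
    PySem.Chars.find l [c] = match l.findIdx? (· = c) with
      | none => -1
      | some i => (i : Int) := by
  cases h : l.findIdx? (· = c) with
  | none =>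
    have hnm : c ∉ l := by
      intro hc
      rcases List.findIdx?_eq_none_iff.mp h c hc with h'
      simp at h'
    simp [(PySem.Chars.find_eq_neg_one_iff l [c]).mpr
      (fun hinf => hnm ((List.singleton_infix_iff c l).mp hinf))]
  | some m =>
    obtain ⟨hm, hc, hmin⟩ := List.findIdx?_eq_some_iff_getElem.mp h
    have hc' : l[m] = c := by simpa using hc
    have hinf : [c] <:+: l := (List.singleton_infix_iff c l).mpr (hc' ▸ List.getElem_mem hm)
    have h0 : (0 : Int) ≤ PySem.Chars.find l [c] := (PySem.Chars.find_nonneg_iff l [c]).mpr hinf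
    obtain ⟨hpre, hmin'⟩ := PySem.Chars.find_spec h0
    set F := (PySem.Chars.find l [c]).toNat with hF
    have hget : l[F]? = some c := by
      rw [← List.head?_drop]
      exact (singleton_prefix_iff c _).mp hpre
    have hFlt : F < l.length := (List.getElem?_eq_some_iff.mp hget).1
    have hFc : l[F] = c := by
      have := (List.getElem?_eq_some_iff.mp hget).2
      exact this
    have hFm : F = m := by
      rcases Nat.lt_trichotomy F m with hlt | heq | hgt
      · exact absurd (by simp [hFc] : decide (l[F] = c) = true) (by simpa using hmin F hlt)
      · exact heq
      · exact absurd ((singleton_prefix_iff c _).mpr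
          (by rw [List.head?_drop]; exact List.getElem?_eq_some_iff.mpr ⟨hm, hc'⟩)) (hmin' m hgt)
    simp only []
    omega

lemma occs_step (l : List Char) (c : Char) (i : Int) :
    (l.findIdx? (· = c) = none → occs l c i = []) ∧
    (∀ m : Nat, l.findIdx? (· = c) = some m →
      occs l c i = (i + m) :: occs (l.drop (m + 1)) c (i + m + 1)) := by
  induction l generalizing i with
  | nil => simp [occs]
  | cons x xs ih =>
    by_cases h : x = c
    · refine ⟨fun hn => ?_, fun m hm => ?_⟩
      · rw [List.findIdx?_cons] at hn; simp [h] at hn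
      · rw [List.findIdx?_cons] at hm
        simp [h] at hm
        subst hm
        simp [occs, h]
    · refine ⟨fun hn => ?_, fun m hm => ?_⟩
      · rw [List.findIdx?_cons] at hn
        simp [h] at hn
        simp [occs, h, (ih (i + 1)).1 (List.findIdx?_eq_none_iff.mpr (by simpa using hn))]
      · rw [List.findIdx?_cons] at hm
        simp [h] at hm
        obtain ⟨m', hm', rfl⟩ := hm
        have h2 := (ih (i + 1)).2 m' hm'
        have hL : occs (x :: xs) c i = occs xs c (i + 1) := by simp [occs, h]
        rw [hL, h2, List.drop_succ_cons]
        congr 1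
        · push_cast; ring
        · congr 1
          push_cast; ring

-- the value of s.find(c, m+1), expressed through findIdx? on the dropped suffix
lemma findFrom_succ (cs : List Char) (c : Char) (m : Nat) (hm : m < cs.length) :
    PySem.Chars.findFrom cs [c] ((m : Int) + 1) =
      match (cs.drop (m + 1)).findIdx? (· = c) with
      | none => -1
      | some mm => ((m + 1 + mm : Nat) : Int) := by
  have h1 : m + 1 ≤ cs.length := hm
  have hcast : ((m : Int) + 1) = ((m + 1 : Nat) : Int) := by push_cast; ring
  rw [hcast, PySem.Chars.findFrom_natCast cs [c] (m + 1) h1, findc]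
  cases hIdx : (cs.drop (m + 1)).findIdx? (· = c) with
  | none => simp
  | some mm =>
    show (if ((mm : Nat) : Int) = -1 then (-1 : Int) else ((m + 1 : Nat) : Int) + ((mm : Nat) : Int)) = ((m + 1 + mm : Nat) : Int)
    rw [if_neg (by omega)]
    push_cast; ring

lemma loopA_neg_one (cs sub : List Char) (k : Int) (fuel : Nat) :
    loopA cs sub k (-1) fuel = true := by
  rw [loopA.eq_def]; simp

lemma loopA_eq (cs : List Char) (c : Char) (k : Int) :
    ∀ (t : List Int) (m fuel : Nat), m < cs.length →
      occs (cs.drop (m + 1)) c ((m : Int) + 1) = t → t.length ≤ fuel →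
      loopA cs [c] k (m : Int) (fuel + 1) = gapsOK k ((m : Int) :: t) := by
  intro t
  induction t with
  | nil =>
    intro m fuel hm hocc _
    have hIdx : (cs.drop (m + 1)).findIdx? (· = c) = none := by
      cases hIdx : (cs.drop (m + 1)).findIdx? (· = c) with
      | none => rfl
      | some mm =>
        have := (occs_step (cs.drop (m + 1)) c ((m : Int) + 1)).2 mm hIdx
        rw [hocc] at this; exact absurd this (by simp)
    have hpos' : PySem.Chars.findFrom cs [c] ((m : Int) + 1) = -1 := by
      rw [findFrom_succ cs c m hm, hIdx]
    have hne : ¬ ((m : Int) = -1) := by omega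
    rw [loopA]
    simp only [hne, if_false, hpos']
    simp [loopA_neg_one, gapsOK]
  | cons h t' ih =>
    intro m fuel hm hocc hlen
    cases hIdx : (cs.drop (m + 1)).findIdx? (· = c) with
    | none =>
      have := (occs_step (cs.drop (m + 1)) c ((m : Int) + 1)).1 hIdx
      rw [hocc] at this; exact absurd this (by simp)
    | some mm =>
      have hstep := (occs_step (cs.drop (m + 1)) c ((m : Int) + 1)).2 mm hIdx
      rw [hocc] at hstep
      obtain ⟨hmlt, -, -⟩ := List.findIdx?_eq_some_iff_getElem.mp hIdx
      rw [List.length_drop] at hmlt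
      injection hstep with hhead htail
      have hh : h = ((m + 1 + mm : Nat) : Int) := by rw [hhead]; push_cast; ring
      have hdd : List.drop (mm + 1) (List.drop (m + 1) cs) = List.drop (m + 1 + mm + 1) cs := by
        rw [List.drop_drop]
        congr 1
      have harg : ((m + 1 + mm : Nat) : Int) + 1 = ((m : Int) + 1 + (mm : Int) + 1) := by
        push_cast; ring
      have ht' : occs (cs.drop (m + 1 + mm + 1)) c (((m + 1 + mm : Nat) : Int) + 1) = t' := by
        rw [htail, hdd, harg]
      have hpos' : PySem.Chars.findFrom cs [c] ((m : Int) + 1) = ((m + 1 + mm : Nat) : Int) := by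
        rw [findFrom_succ cs c m hm, hIdx]
      obtain ⟨fuel', rfl⟩ : ∃ f', fuel = f' + 1 := by
        cases fuel with
        | zero => simp at hlen
        | succ f => exact ⟨f, rfl⟩
      have hne : ¬ ((m : Int) = -1) := by omega
      rw [loopA]
      simp only [hne, if_false, hpos']
      have habs : |((m + 1 + mm : Nat) : Int) - (m : Int)| = ((m + 1 + mm : Nat) : Int) - (m : Int) := by
        apply abs_of_nonneg; push_cast; omega
      by_cases hk : ((m + 1 + mm : Nat) : Int) - (m : Int) < k
      · have hcond : (((m + 1 + mm : Nat) : Int) ≠ -1 ∧ |((m + 1 + mm : Nat) : Int) - (m : Int)| < k) := by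
          refine ⟨by push_cast; omega, ?_⟩
          rw [habs]; exact hk
        rw [if_pos hcond]
        simp only [hh, gapsOK]
        rw [if_pos hk]
      · have hcond : ¬ (((m + 1 + mm : Nat) : Int) ≠ -1 ∧ |((m + 1 + mm : Nat) : Int) - (m : Int)| < k) := by
          rw [habs]; tauto
        rw [if_neg hcond]
        have hm' : m + 1 + mm < cs.length := by omega
        have hrec := ih (m + 1 + mm) fuel' hm' ht' (by simpa using hlen)
        rw [hrec]
        simp only [hh, gapsOK]
        rw [if_neg hk]

lemma checkA_eq (cs : List Char) (c : Char) (k : Int) :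
    checkA cs [c] k = gapsOK k (occs cs c 0) := by
  unfold checkA
  rw [findc]
  cases hIdx : cs.findIdx? (· = c) with
  | none =>
    rw [(occs_step cs c 0).1 hIdx]
    show loopA cs [c] k (-1) cs.length = gapsOK k []
    simp [loopA_neg_one, gapsOK]
  | some m0 =>
    have hstep' : occs cs c 0 = (m0 : Int) :: occs (cs.drop (m0 + 1)) c ((m0 : Int) + 1) := by
      rw [(occs_step cs c 0).2 m0 hIdx]
      norm_num
    obtain ⟨hm0, -, -⟩ := List.findIdx?_eq_some_iff_getElem.mp hIdx
    obtain ⟨f, hf⟩ : ∃ f, cs.length = f + 1 := ⟨cs.length - 1, by omega⟩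
    rw [hstep', hf]
    show loopA cs [c] k ((m0 : Nat) : Int) (f + 1) = _
    apply loopA_eq cs c k _ m0 f hm0 rfl
    have h1 := occs_length (cs.drop (m0 + 1)) c ((m0 : Int) + 1)
    rw [List.length_drop] at h1
    omega

lemma scanC_eq (c : Char) (k : Int) :
    ∀ (l : List Char) (i : Int) (last : Option Int),
      scanC c k last (PySem.List.enumerate l i) =
        gapsOK k (match last with | none => occs l c i | some j => j :: occs l c i) := by
  intro l
  induction l with
  | nil => intro i last; cases last <;> simp [PySem.List.enumerate_nil, scanC, occs, gapsOK]
  | cons x xs ih =>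
    intro i last
    rw [PySem.List.enumerate_cons]
    by_cases h : x = c
    · subst h
      cases last with
      | none =>
        simp only [scanC, occs, ih (i + 1) (some i)]
        simp
      | some j =>
        by_cases hk : i - j < k
        · simp [scanC, occs, gapsOK, hk]
        · simp only [scanC, occs, ih (i + 1) (some i)]
          simp only [if_neg hk]
          show gapsOK k (i :: occs xs x (i + 1)) =
            if i - j < k then false else gapsOK k (i :: occs xs x (i + 1))
          rw [if_neg hk]
    · cases last with
      | none =>
        simp only [scanC, occs, h, if_false, ih (i + 1) none]
      | some j =>
        simp only [scanC, occs, h, if_false, ih (i + 1) (some j)]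

lemma threshB_get (c : Char) :
    threshB.get? c = if c = 'S' then some 5 else if c = 'R' then some 4
      else if c = 'P' then some 5 else none := by
  show (PySem.Dict.mk [('S', (5 : Int)), ('R', 4), ('P', 5)]).get? c = _
  by_cases h1 : c = 'S'
  · subst h1; rfl
  · by_cases h2 : c = 'R'
    · subst h2; rfl
    · by_cases h3 : c = 'P'
      · subst h3; rfl
      · simp [PySem.Dict.get?_mk_cons, Ne.symm h1, Ne.symm h2, Ne.symm h3, h1, h2, h3]
        rfl

lemma goB_eq : ∀ (ps : List (Int × Char)) (last : PySem.Dict Char Int),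
    goB ps last = (scanC 'S' 5 (last.get? 'S') ps &&
      (scanC 'R' 4 (last.get? 'R') ps && scanC 'P' 5 (last.get? 'P') ps)) := by
  intro ps
  induction ps with
  | nil => intro last; simp [goB, scanC]
  | cons p rest ih =>
    intro last
    obtain ⟨i, c⟩ := p
    by_cases h1 : c = 'S'
    · subst h1
      rw [goB, threshB_get]
      cases hl : last.get? 'S' with
      | some j =>
        by_cases hk : i - j < 5
        · simp [scanC, hk]
        · simp only [ih (last.insert 'S' i),
            PySem.Dict.get?_insert_self,
            PySem.Dict.get?_insert_of_ne last (k := 'S') (k' := 'R') i (by decide),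
            PySem.Dict.get?_insert_of_ne last (k := 'S') (k' := 'P') i (by decide)]
          simp [scanC, hk]
      | none =>
        simp only [ih (last.insert 'S' i),
          PySem.Dict.get?_insert_self,
          PySem.Dict.get?_insert_of_ne last (k := 'S') (k' := 'R') i (by decide),
          PySem.Dict.get?_insert_of_ne last (k := 'S') (k' := 'P') i (by decide)]
        simp [scanC]
    · by_cases h2 : c = 'R'
      · subst h2
        rw [goB, threshB_get]
        rw [if_neg (show ¬('R' : Char) = 'S' by decide), if_pos (rfl : ('R' : Char) = 'R')]
        cases hl : last.get? 'R' with
        | some j =>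
          by_cases hk : i - j < 4
          · simp [scanC, hk]
          · simp only [ih (last.insert 'R' i),
              PySem.Dict.get?_insert_self,
              PySem.Dict.get?_insert_of_ne last (k := 'R') (k' := 'S') i (by decide),
              PySem.Dict.get?_insert_of_ne last (k := 'R') (k' := 'P') i (by decide)]
            simp [scanC, hk]
        | none =>
          simp only [ih (last.insert 'R' i),
            PySem.Dict.get?_insert_self,
            PySem.Dict.get?_insert_of_ne last (k := 'R') (k' := 'S') i (by decide),
            PySem.Dict.get?_insert_of_ne last (k := 'R') (k' := 'P') i (by decide)]
          simp [scanC]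
      · by_cases h3 : c = 'P'
        · subst h3
          rw [goB, threshB_get]
          rw [if_neg (show ¬('P' : Char) = 'S' by decide), if_neg (show ¬('P' : Char) = 'R' by decide),
            if_pos (rfl : ('P' : Char) = 'P')]
          cases hl : last.get? 'P' with
          | some j =>
            by_cases hk : i - j < 5
            · simp [scanC, hk]
            · simp only [ih (last.insert 'P' i),
                PySem.Dict.get?_insert_self,
                PySem.Dict.get?_insert_of_ne last (k := 'P') (k' := 'S') i (by decide),
                PySem.Dict.get?_insert_of_ne last (k := 'P') (k' := 'R') i (by decide)]
              simp [scanC, hk]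
          | none =>
            simp only [ih (last.insert 'P' i),
              PySem.Dict.get?_insert_self,
              PySem.Dict.get?_insert_of_ne last (k := 'P') (k' := 'S') i (by decide),
              PySem.Dict.get?_insert_of_ne last (k := 'P') (k' := 'R') i (by decide)]
            simp [scanC]
        · rw [goB, threshB_get]
          simp only [h1, h2, h3, if_false]
          rw [ih last]
          simp [scanC, h1, h2, h3]

-- ===== VERDICT (by name: the statement is the Claim_ definition above) =====
theorem valid_action_spec : Claim_equal_valid_action := by
  intro action _
  unfold Spec_valid_action valid_action valid_action_alt
  simp only [goB_eq, checkA_eq, scanC_eq, PySem.Dict.get?_empty]
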